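-- pv_equiv track=rewrite | github.com/grantjr1842/index-tts | tools/generate_tars_data.py | generate_synthesis_entry
-- ===== SOURCE A (Python) =====
-- def generate_synthesis_entry(idx: int, text: str) -> dict:
--     """Create a synthesis entry with unique ID."""
--     # Create a safe filename slug from the text
--     slug = text[:40].lower()
--     slug = "".join(c if c.isalnum() else "_" for c in slug)
--     slug = "_".join(filter(None, slug.split("_")))
--
--     return {
--         "id": f"tars_{idx:03d}_{slug}",
--         "text": text,
--     }
-- ===== SOURCE B (Python) =====
-- def generate_synthesis_entry(idx: int, text: str) -> dict:
--     """Create a synthesis entry with unique ID."""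
--     # Single fused pass: emit alnum chars; a run of non-alnum chars becomes one
--     # pending '_' that is written only between two emitted alnum chars, so
--     # leading/trailing separators vanish and runs collapse without split/join.
--     out = []
--     pending = False
--     for c in text[:40].lower():
--         if c.isalnum():
--             if pending and out:
--                 out.append("_")
--             out.append(c)
--             pending = False
--         else:
--             pending = True
--     slug = "".join(out)
--     return {
--         "id": f"tars_{idx:03d}_{slug}",
--         "text": text,
--     }
-- ===== Notes on version B (the rewrite author's own statement) =====
-- stated objective: simpler
-- what changed: Replaced A's three-stage slug pipeline (map every char to itself-or-'_', split on '_', filter out empty pieces, re-join with '_') by one fused left-to-right pass that emits alphanumeric characters directly and turns each run of non-alphanumerics into a single pending '_' written only between two emitted characters.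
import Mathlib
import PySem

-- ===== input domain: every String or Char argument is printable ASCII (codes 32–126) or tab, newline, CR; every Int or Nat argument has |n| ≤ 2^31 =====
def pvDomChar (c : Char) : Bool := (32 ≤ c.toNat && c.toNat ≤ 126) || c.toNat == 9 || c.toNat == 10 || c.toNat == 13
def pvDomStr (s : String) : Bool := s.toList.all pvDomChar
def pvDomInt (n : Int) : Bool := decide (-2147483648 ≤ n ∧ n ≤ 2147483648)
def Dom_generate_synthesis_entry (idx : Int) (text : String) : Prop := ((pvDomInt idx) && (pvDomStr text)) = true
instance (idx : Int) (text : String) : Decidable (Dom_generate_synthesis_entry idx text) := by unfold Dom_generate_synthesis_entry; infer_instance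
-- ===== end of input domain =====

-- B replaces A's map + split + filter + join slug pipeline by one fused pass with a pending-separator flag; objective: simpler (one traversal), same value.

-- ===== PORT A =====
-- f"{idx:03d}" is ported as str(idx).zfill(3), which is identical for the plain 'd' format.
def generate_synthesis_entry (idx : Int) (text : String) : List (String × String) :=
  let slug0 : List Char := PySem.Chars.lower (PySem.List.slice text.toList none (some 40))
  let slug1 : List Char := slug0.map (fun c => if PySem.Chars.isalnum c then c else '_')
  let slug2 : List Char :=
    PySem.Chars.join ['_'] ((PySem.Chars.splitOn slug1 ['_']).filter (fun w => !w.isEmpty))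
  [("id", "tars_" ++ PySem.Str.zfill (PySem.Int.toStr idx) 3 ++ "_" ++ String.ofList slug2),
   ("text", text)]

-- ===== PORT B =====
-- the fused loop of Source B: out/pending accumulator
def pvAltGo : List Char → List Char → Bool → List Char
  | [], out, _ => out
  | c :: cs, out, pending =>
    if PySem.Chars.isalnum c then
      pvAltGo cs ((if pending && !out.isEmpty then out ++ ['_'] else out) ++ [c]) false
    else
      pvAltGo cs out true

def generate_synthesis_entry_alt (idx : Int) (text : String) : List (String × String) :=
  let slug : List Char :=
    pvAltGo (PySem.Chars.lower (PySem.List.slice text.toList none (some 40))) [] false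
  [("id", "tars_" ++ PySem.Str.zfill (PySem.Int.toStr idx) 3 ++ "_" ++ String.ofList slug),
   ("text", text)]

-- ===== PRECONDITION & SPEC =====
def Spec_generate_synthesis_entry (idx : Int) (text : String) (out : List (String × String)) : Prop := out = generate_synthesis_entry_alt idx text
instance (idx : Int) (text : String) (out : List (String × String)) : Decidable (Spec_generate_synthesis_entry idx text out) := by unfold Spec_generate_synthesis_entry; infer_instance

-- ===== CLAIM (what is proved, stated in full; the proofs are below) =====
def Claim_equal_generate_synthesis_entry : Prop := ∀ (idx : Int) (text : String), Dom_generate_synthesis_entry idx text → Spec_generate_synthesis_entry idx text (generate_synthesis_entry idx text)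

-- ===== LEMMAS AND PROOFS =====

-- A's char map, as a named function for the proofs
def pvF (c : Char) : Char := if PySem.Chars.isalnum c then c else '_'

-- simple recursive model of s.split('_')
def pvSplit1 : List Char → List (List Char)
  | [] => [[]]
  | c :: m => if c = '_' then [] :: pvSplit1 m else (pvSplit1 m).modifyHead (c :: ·)

-- recursive model of the collapsed slug
def pvMyg : List Char → List Char
  | [] => []
  | c :: m =>
    if c = '_' then pvMyg m
    else c :: (if pvMyg m = [] then []
               else (if m.head? = some '_' then ['_'] else []) ++ pvMyg m)

def pvFilt (m : List Char) : List (List Char) := (pvSplit1 m).filter (fun w => !w.isEmpty)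

lemma pvSplit1_ne_nil (m : List Char) : pvSplit1 m ≠ [] := by
  cases m with
  | nil => simp [pvSplit1]
  | cons c m =>
    by_cases h : c = '_' <;> simp [pvSplit1, h]
    cases hS : pvSplit1 m with
    | nil => exact absurd hS (pvSplit1_ne_nil m)
    | cons w ws => simp [hS]

lemma pv_join_cons (s x : List Char) (xs : List (List Char)) :
    PySem.Chars.join s (x :: xs) = x ++ (if xs.isEmpty then [] else s ++ PySem.Chars.join s xs) := by
  cases xs <;> simp [PySem.Chars.join, List.intercalate, List.intersperse]

lemma pv_joinFilt_nil_iff (m : List Char) :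
    PySem.Chars.join ['_'] (pvFilt m) = [] ↔ pvFilt m = [] := by
  cases hF : pvFilt m with
  | nil => simp [PySem.Chars.join, List.intercalate, List.intersperse]
  | cons w ws =>
    have hw : (!w.isEmpty) = true := by
      have hmem : w ∈ pvFilt m := by rw [hF]; exact List.mem_cons_self
      exact (List.mem_filter.mp hmem).2
    rw [pv_join_cons]
    constructor
    · intro h
      cases w with
      | nil => simp at hw
      | cons a as => simp at h
    · intro h; simp at h

lemma pvFilt_underscore (m : List Char) : pvFilt ('_' :: m) = pvFilt m := by
  simp [pvFilt, pvSplit1]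

lemma pv_pipeline_eq_myg (m : List Char) :
    PySem.Chars.join ['_'] (pvFilt m) = pvMyg m := by
  induction m with
  | nil => simp [pvFilt, pvSplit1, pvMyg, PySem.Chars.join, List.intercalate]
  | cons c m ih =>
    by_cases hc : c = '_'
    · subst hc
      rw [pvFilt_underscore]
      simpa [pvMyg] using ih
    · cases m with
      | nil =>
        simp [pvFilt, pvSplit1, pvMyg, hc, PySem.Chars.join, List.intercalate,
          List.modifyHead]
      | cons d m2 =>
        by_cases hd : d = '_'
        · subst hd
          have h1 : pvFilt (c :: '_' :: m2) = [c] :: pvFilt m2 := by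
            simp [pvFilt, pvSplit1, hc, List.modifyHead]
          have h2 : PySem.Chars.join ['_'] (pvFilt m2) = pvMyg m2 := by
            have := ih
            rwa [pvFilt_underscore, show pvMyg ('_' :: m2) = pvMyg m2 by simp [pvMyg]] at this
          rw [h1, pv_join_cons]
          by_cases hE : pvFilt m2 = []
          · have hM : pvMyg m2 = [] := by
              rw [← h2, hE]; simp [PySem.Chars.join, List.intercalate, List.intersperse]
            simp [pvMyg, hc, hE, hM]
          · have hne : pvMyg m2 ≠ [] := by
              rw [← h2]; intro h; exact hE ((pv_joinFilt_nil_iff m2).mp h)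
            simp [pvMyg, hc, hE, hne, h2]
        · obtain ⟨w, ws, hS⟩ : ∃ w ws, pvSplit1 m2 = w :: ws := by
            cases hS : pvSplit1 m2 with
            | nil => exact absurd hS (pvSplit1_ne_nil m2)
            | cons w ws => exact ⟨w, ws, rfl⟩
          have h1 : pvFilt (c :: d :: m2)
              = (c :: d :: w) :: ws.filter (fun w => !w.isEmpty) := by
            simp [pvFilt, pvSplit1, hc, hd, hS, List.modifyHead]
          have h1' : pvFilt (d :: m2)
              = (d :: w) :: ws.filter (fun w => !w.isEmpty) := by
            simp [pvFilt, pvSplit1, hd, hS, List.modifyHead]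
          have hne : pvMyg (d :: m2) ≠ [] := by simp [pvMyg, hd]
          have hR : pvMyg (c :: d :: m2) = c :: pvMyg (d :: m2) := by
            simp [pvMyg, hc, hd]
          rw [h1', pv_join_cons] at ih
          rw [h1, pv_join_cons, hR, ← ih]
          simp

lemma pv_go_eq (l : List Char) (fuel : Nat) (cur : List Char) (acc : List (List Char))
    (h : l.length ≤ fuel) :
    PySem.Chars.splitOn.go ['_'] fuel l cur acc
      = acc.reverse ++ (pvSplit1 l).modifyHead (cur.reverse ++ ·) := by
  induction l generalizing fuel cur acc with
  | nil => cases fuel <;> simp [PySem.Chars.splitOn.go, pvSplit1, List.modifyHead]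
  | cons c cs ih =>
    cases fuel with
    | zero => simp at h
    | succ f =>
      have hf : cs.length ≤ f := by simpa using h
      by_cases hc : c = '_'
      · subst hc
        have hpre : List.isPrefixOf ['_'] ('_' :: cs) = true := by
          simp [List.isPrefixOf]
        rw [PySem.Chars.splitOn.go]
        simp only [hpre, if_true, List.drop_succ_cons, List.drop_zero, List.length_singleton]
        rw [ih f [] (cur.reverse :: acc) hf]
        cases hS : pvSplit1 cs with
        | nil => exact absurd hS (pvSplit1_ne_nil cs)
        | cons w ws => simp [pvSplit1, hS, List.modifyHead]
      · have hpre : List.isPrefixOf ['_'] (c :: cs) = false := by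
          simp [List.isPrefixOf]
          exact fun h' => hc h'.symm
        rw [PySem.Chars.splitOn.go]
        simp only [hpre, Bool.false_eq_true, if_false]
        rw [ih f (c :: cur) acc hf]
        cases hS : pvSplit1 cs with
        | nil => exact absurd hS (pvSplit1_ne_nil cs)
        | cons w ws => simp [pvSplit1, hc, hS, List.modifyHead]

lemma pv_splitOn_eq (m : List Char) : PySem.Chars.splitOn m ['_'] = pvSplit1 m := by
  have := pv_go_eq m (m.length + 1) [] [] (by omega)
  simpa [PySem.Chars.splitOn] using this.trans (by
    cases hS : pvSplit1 m with
    | nil => exact absurd hS (pvSplit1_ne_nil m)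
    | cons w ws => simp [List.modifyHead])

lemma pv_isalnum_ne_underscore {c : Char} (h : PySem.Chars.isalnum c = true) : c ≠ '_' := by
  intro hc; subst hc; exact absurd h (by decide)

lemma pvAltGo_eq (l : List Char) (acc : List Char) (p : Bool) :
    pvAltGo l acc p
      = acc ++ (if pvMyg (l.map pvF) = [] then []
          else (if acc ≠ [] ∧ (p = true ∨ (l.map pvF).head? = some '_') then ['_'] else [])
               ++ pvMyg (l.map pvF)) := by
  induction l generalizing acc p with
  | nil => simp [pvAltGo, pvMyg]
  | cons c l ih =>
    by_cases hc : PySem.Chars.isalnum c = true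
    · have hcu : c ≠ '_' := pv_isalnum_ne_underscore hc
      have hf : pvF c = c := by simp [pvF, hc]
      rw [pvAltGo, if_pos hc, ih]
      simp only [List.map_cons, hf, List.head?_cons]
      by_cases hM : pvMyg (l.map pvF) = [] <;>
        by_cases hp : p <;>
          by_cases ha : acc = [] <;>
            simp [pvMyg, hcu, hM, hp, ha]
    · have hf : pvF c = '_' := by simp [pvF, hc]
      rw [pvAltGo, if_neg hc, ih]
      simp only [List.map_cons, hf, List.head?_cons]
      by_cases hM : pvMyg (l.map pvF) = [] <;>
        by_cases ha : acc = [] <;>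
          simp [pvMyg, hM, ha]

lemma pv_slug_eq (l : List Char) :
    PySem.Chars.join ['_']
        ((PySem.Chars.splitOn (l.map (fun c => if PySem.Chars.isalnum c then c else '_')) ['_']).filter
          (fun w => !w.isEmpty))
      = pvAltGo l [] false := by
  have hmap : (l.map (fun c => if PySem.Chars.isalnum c then c else '_')) = l.map pvF := by
    simp [pvF]
  rw [hmap, pv_splitOn_eq, pvAltGo_eq]
  have := pv_pipeline_eq_myg (l.map pvF)
  rw [pvFilt] at this
  rw [this]
  by_cases h : pvMyg (l.map pvF) = [] <;> simp [h]

-- ===== VERDICT (by name: the statement is the Claim_ definition above) =====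
theorem generate_synthesis_entry_spec : Claim_equal_generate_synthesis_entry := by
  intro idx text _
  unfold Spec_generate_synthesis_entry generate_synthesis_entry generate_synthesis_entry_alt
  dsimp only
  rw [pv_slug_eq]
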